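-- pv_equiv track=rewrite | github.com/reivak720/cows | racer.py | richard_uk
-- ===== SOURCE A (Python) =====
-- def richard_uk(cows, limit=10):
--
--     cowsLeft = cows.copy()                   # so I can mutate dict
--
--     # helper function to choose next cow
--
--     def next_cow(cowsLeft, limit):
--         '''
--         :param cowsLeft: dict of earthbound cows
--         :param limit: weight capacity remaining on ship
--         :return: name: string, name of cow, or "" if none will fit
--         '''
--         if len(cowsLeft) == 0:
--             return ""
--         trialSet = set(cowsLeft.values())
--         trialList = sorted(list(trialSet))   # list of unique weights in asc order
--         while len(trialList) > 0:
--             trial = trialList.pop()          # heaviest left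
--             if trial <= limit:
--                 L = [k for k, v in cowsLeft.items() if v == trial]
--                 if L != []:                  # list of cows of that weight
--                     return L[0]              # doesn't matter which one
--         return ""
--
--     schedule = []
--     while len(cowsLeft) > 0:
--         ship = []
--         spare = limit                       # room left on ship, starts as limit
--         while spare >= min(cowsLeft.values()):
--             next = next_cow(cowsLeft, spare)
--             if next == "":
--                 schedule.append(ship)       # no room on this ship
--                 break
--             ship.append(next)               # add max cow and continue
--             spare -= cowsLeft[next]         # try to fit another
--             del cowsLeft[next]              # remove cow from earthbound dict
--             if len(cowsLeft) == 0 or spare < min(cowsLeft.values()):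
--                 schedule.append(ship)       # no room or no cows
--                 break
--     return schedule
-- ===== SOURCE B (Python) =====
-- def richard_uk(cows, limit=10):
--     # Sort once by (weight, -index); each pick is a binary search for the
--     # rightmost fitting pair = heaviest fitting weight, earliest-inserted cow.
--     items = list(cows.items())
--     pairs = sorted((w, -i) for i, (_, w) in enumerate(items))
--     schedule = []
--     while pairs:
--         spare = limit
--         ship = []
--         while True:
--             lo, hi = 0, len(pairs)
--             while lo < hi:
--                 mid = (lo + hi) // 2
--                 if pairs[mid][0] <= spare:
--                     lo = mid + 1
--                 else:
--                     hi = mid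
--             if lo == 0:
--                 break
--             w, negi = pairs.pop(lo - 1)
--             ship.append(items[-negi][0])
--             spare -= w
--         if not ship:
--             break
--         schedule.append(ship)
--     return schedule
-- ===== Notes on version B (the rewrite author's own statement) =====
-- stated objective: faster
-- what changed: A rebuilds a set of the remaining weights, sorts it and filters the whole dict for every single pick; B sorts the cows once by (weight, -index) and makes each pick by a hand-written binary search for the rightmost pair fitting the spare capacity (= heaviest fitting weight, earliest-inserted cow), removing it from the sorted list.
import Mathlib
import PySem

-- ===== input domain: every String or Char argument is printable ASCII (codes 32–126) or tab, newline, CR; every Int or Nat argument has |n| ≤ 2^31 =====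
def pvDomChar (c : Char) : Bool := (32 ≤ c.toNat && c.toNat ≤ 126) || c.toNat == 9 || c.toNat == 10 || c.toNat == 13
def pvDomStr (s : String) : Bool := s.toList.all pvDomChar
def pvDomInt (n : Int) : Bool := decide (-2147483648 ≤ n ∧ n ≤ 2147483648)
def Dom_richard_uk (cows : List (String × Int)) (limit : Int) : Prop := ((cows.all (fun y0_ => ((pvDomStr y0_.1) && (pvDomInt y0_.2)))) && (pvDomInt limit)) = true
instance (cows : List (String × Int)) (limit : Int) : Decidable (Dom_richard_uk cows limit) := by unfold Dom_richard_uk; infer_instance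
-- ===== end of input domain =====

-- B sorts the cows once by (weight, -index) and picks each cow by binary search for the
-- rightmost fitting pair, replacing A's per-pick set/sort/filter machinery; equivalence is
-- proved for the returned schedule (A does not mutate its argument).

-- ===== PORT A =====
-- next_cow's 'while trialList: trial = trialList.pop()' pops from the END of the ascending
-- list, so it is the scan of the REVERSED sorted list of distinct weights.
def nextCowScan (d : PySem.Dict String Int) (limit : Int) : List Int → String
  | [] => ""
  | t :: rest =>
    if t ≤ limit then
      match (d.items.filter (fun kv => kv.2 == t)).map (fun kv => kv.1) with
      | [] => nextCowScan d limit rest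
      | k :: _ => k
    else nextCowScan d limit rest

def nextCow (d : PySem.Dict String Int) (limit : Int) : String :=
  if d.size = 0 then ""
  else
    let trialSet : PySem.Set Int := PySem.Set.ofList d.values
    let trialList := PySem.List.sorted trialSet (fun v => v) false
    nextCowScan d limit trialList.reverse

-- the inner 'while spare >= min(cowsLeft.values())' loop; fuel only guards termination
-- (on inputs excluded by Pre_ the Python loops forever).  'min' of an empty dict would be a
-- ValueError in Python; that point is unreachable (the loop breaks first), we return the state.
def shipLoop (fuel : Nat) (d : PySem.Dict String Int) (spare : Int) (ship : List String)
    (schedule : List (List String)) : List (List String) × PySem.Dict String Int :=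
  match fuel with
  | 0 => (schedule, d)
  | fuel + 1 =>
    match PySem.List.min? d.values (fun v => v) with
    | none => (schedule, d)
    | some m =>
      if m ≤ spare then
        let nxt := nextCow d spare
        if nxt = "" then (schedule ++ [ship], d)
        else
          let ship' := ship ++ [nxt]
          let w := (d.get? nxt).getD 0     -- cowsLeft[next]; KeyError impossible, nxt is a key of d
          let spare' := spare - w
          let d' := d.erase nxt
          if d'.size = 0 ∨ spare' < ((PySem.List.min? d'.values (fun v => v)).getD 0) then
            (schedule ++ [ship'], d')
          else shipLoop fuel d' spare' ship' schedule
      else (schedule, d)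

def outerLoop (fuel : Nat) (d : PySem.Dict String Int) (limit : Int)
    (schedule : List (List String)) : List (List String) :=
  match fuel with
  | 0 => schedule
  | fuel + 1 =>
    if d.size = 0 then schedule
    else
      let r := shipLoop (d.size + 1) d limit [] schedule
      outerLoop fuel r.2 limit r.1

def richard_uk (cows : List (String × Int)) (limit : Int) : List (List String) :=
  let d := PySem.Dict.ofList cows
  outerLoop (d.size + 1) d limit []

-- ===== PORT B =====
-- the hand-written 'while lo < hi' binary search of Source B (rightmost position whose weight ≤ spare)
def bsLoop (arr : List (Int × Int)) (spare : Int) (lo hi : Nat) : Nat :=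
  if h : lo < hi then
    let mid := (lo + hi) / 2
    if ((PySem.List.pyGet? arr (mid : Int)).getD (0, 0)).1 ≤ spare then
      bsLoop arr spare (mid + 1) hi
    else
      bsLoop arr spare lo mid
  else lo
termination_by hi - lo
decreasing_by all_goals omega

-- the inner 'while True' pick loop; fuel = number of remaining pairs (each pass pops one;
-- on fuel 0 the list is empty, the search returns 0 and the Python breaks too)
def altShip (items0 : List (String × Int)) : Nat → List (Int × Int) → Int → List String →
    List String × List (Int × Int)
  | 0, arr, _, ship => (ship, arr)
  | fuel + 1, arr, spare, ship =>
    let lo := bsLoop arr spare 0 arr.length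
    if lo = 0 then (ship, arr)
    else
      let pr := (PySem.List.pop? arr ((lo : Int) - 1)).getD ((0, 0), arr)
      altShip items0 fuel pr.2 (spare - pr.1.1)
        (ship ++ [((PySem.List.pyGet? items0 (-pr.1.2)).getD ("", 0)).1])

-- the outer 'while pairs' loop; fuel = initial number of pairs (every kept ship removes ≥ 1)
def altOuter (items0 : List (String × Int)) : Nat → List (Int × Int) → Int →
    List (List String) → List (List String)
  | 0, _, _, schedule => schedule
  | fuel + 1, arr, limit, schedule =>
    if arr.isEmpty then schedule
    else
      let r := altShip items0 arr.length arr limit []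
      if r.1.isEmpty then schedule
      else altOuter items0 fuel r.2 limit (schedule ++ [r.1])

-- sorted(list of 2-tuples) compares lexicographically = PySem.List.sorted2 with fst/snd keys
def richard_uk_alt (cows : List (String × Int)) (limit : Int) : List (List String) :=
  let items := (PySem.Dict.ofList cows).items
  let pairs := PySem.List.sorted2 ((PySem.List.enumerate items).map (fun e => (e.2.2, -e.1)))
    (fun p => p.1) (fun p => p.2)
  altOuter items pairs.length pairs limit []

-- ===== PRECONDITION & SPEC =====
-- sum of the magnitudes of the negative weights: no ship's spare capacity can ever exceed
-- limit + pvNegSum (the weights already loaded sum to at least -pvNegSum)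
def pvNegSum (l : List (String × Int)) : Int :=
  (l.map (fun kv => if kv.2 < 0 then -kv.2 else 0)).sum

-- Pre_ excludes cows named "" that could ever be picked (weight ≤ limit + pvNegSum): "" collides
-- with next_cow's "" sentinel, the cow is never removed and A's Python loops forever there, while
-- B packs it normally.  (On other inputs where A's Python loops forever — a never-loadable cow
-- remains — the fuel-guarded port of A returns the schedule accumulated so far, which the theorem
-- proves equal to B's result; such inputs stay inside Pre_.)
def Pre_richard_uk (cows : List (String × Int)) (limit : Int) : Prop :=
  ∀ kv ∈ (PySem.Dict.ofList cows).items, kv.1 = "" →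
    limit + pvNegSum (PySem.Dict.ofList cows).items < kv.2
instance (cows : List (String × Int)) (limit : Int) : Decidable (Pre_richard_uk cows limit) := by
  unfold Pre_richard_uk; infer_instance

def pvWitness_richard_uk : (List (String × Int)) × Int :=
  ([("daisy", 3), ("bella", 7), ("moo", 7), ("ann", 1)], 10)

def Spec_richard_uk (cows : List (String × Int)) (limit : Int) (out : List (List String)) : Prop := out = richard_uk_alt cows limit
instance (cows : List (String × Int)) (limit : Int) (out : List (List String)) : Decidable (Spec_richard_uk cows limit out) := by unfold Spec_richard_uk; infer_instance

-- ===== CLAIM (what is proved, stated in full; the proofs are below) =====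
def Claim_equal_richard_uk : Prop := ∀ (cows : List (String × Int)) (limit : Int), Dom_richard_uk cows limit → Pre_richard_uk cows limit → Spec_richard_uk cows limit (richard_uk cows limit)

-- ===== LEMMAS AND PROOFS =====

-- ---- generic helpers about A's picking (unchanged characterisation of next_cow) ----

def IsBest (spare : Int) (l : List (String × Int)) (w : Int) : Prop :=
  w ∈ l.map (·.2) ∧ w ≤ spare ∧ ∀ kv ∈ l, kv.2 ≤ spare → kv.2 ≤ w

-- the scan of a strictly descending list of available weights returns the first key
-- of the first pair whose value is the best fitting weight
lemma nextCowScan_best (d : PySem.Dict String Int) (spare : Int) :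
    ∀ ts : List Int, ts.Pairwise (fun a b => b < a) → (∀ t ∈ ts, t ∈ d.values) →
    ∀ w ∈ ts, w ≤ spare → (∀ t ∈ ts, t ≤ spare → t ≤ w) →
    ∀ k ks, (d.items.filter (fun kv => kv.2 == w)).map (fun kv => kv.1) = k :: ks →
    nextCowScan d spare ts = k := by
  intro ts
  induction ts with
  | nil => intro _ _ w hw; cases hw
  | cons t rest ih =>
    intro hpw hmem w hw hwle hmax k ks hfil
    unfold nextCowScan
    by_cases hts : t ≤ spare
    · have hwt : w = t := by
        have h1 : t ≤ w := hmax t (by simp) hts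
        rcases List.mem_cons.mp hw with rfl | hw'
        · rfl
        · have := (List.pairwise_cons.mp hpw).1 w hw'
          omega
      subst hwt
      rw [if_pos hts, hfil]
    · rw [if_neg hts]
      have hw' : w ∈ rest := by
        rcases List.mem_cons.mp hw with rfl | hw'
        · exact absurd hwle hts
        · exact hw'
      exact ih (List.pairwise_cons.mp hpw).2 (fun t' ht' => hmem t' (by simp [ht']))
        w hw' hwle (fun t' ht' => hmax t' (by simp [ht'])) k ks hfil

lemma nextCow_eq_of_isBest (d : PySem.Dict String Int) (spare : Int) (w : Int)
    (hb : IsBest spare d.items w) (k : String) (ks : List String)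
    (hfil : (d.items.filter (fun kv => kv.2 == w)).map (fun kv => kv.1) = k :: ks) :
    nextCow d spare = k := by
  rcases hb with ⟨hm, hle, hmax⟩
  have hne : d.items ≠ [] := by
    rcases List.mem_map.mp hm with ⟨kv, hkv, _⟩
    intro h; rw [h] at hkv; cases hkv
  unfold nextCow
  rw [if_neg (by simpa [PySem.Dict.size] using fun h => hne (List.eq_nil_of_length_eq_zero h))]
  refine nextCowScan_best d spare _ ?_ ?_ w ?_ hle ?_ k ks hfil
  · rw [List.pairwise_reverse]
    exact (PySem.List.sorted_ofList_pairwise_lt (xs := d.values)).imp (fun h => h)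
  · intro t ht
    rw [List.mem_reverse, PySem.List.mem_sorted] at ht
    exact (PySem.Set.mem_ofList _ _).mp ht
  · rw [List.mem_reverse, PySem.List.mem_sorted]
    exact (PySem.Set.mem_ofList _ _).mpr (by simpa [PySem.Dict.values] using hm)
  · intro t ht hts
    rw [List.mem_reverse, PySem.List.mem_sorted] at ht
    have ht' : t ∈ d.values := (PySem.Set.mem_ofList _ _).mp ht
    rcases List.mem_map.mp ht' with ⟨kv, hkv, rfl⟩
    exact hmax kv hkv hts

lemma filter_key_eq_eraseIdx : ∀ (l : List (String × Int)) (i : Nat) (kv0 : String × Int),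
    l[i]? = some kv0 → (l.map Prod.fst).Nodup →
    l.filter (fun p => !(p.1 == kv0.1)) = l.eraseIdx i := by
  intro l
  induction l with
  | nil => intro i kv0 h; cases h
  | cons a t ih =>
    intro i kv0 hget hnd
    rw [List.map_cons, List.nodup_cons] at hnd
    rcases i with _ | j
    · simp only [List.getElem?_cons_zero, Option.some.injEq] at hget
      subst hget
      rw [List.eraseIdx_cons_zero, List.filter_cons_of_neg (by simp)]
      refine List.filter_eq_self.mpr ?_
      intro p hp
      have hmem : p.1 ∈ t.map Prod.fst := List.mem_map.mpr ⟨p, hp, rfl⟩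
      have hne : ¬ p.1 = a.1 := fun he => hnd.1 (he ▸ hmem)
      simp [hne]
    · simp only [List.getElem?_cons_succ] at hget
      have hkv0 : kv0 ∈ t := List.mem_of_getElem? hget
      have hmem : kv0.1 ∈ t.map Prod.fst := List.mem_map.mpr ⟨kv0, hkv0, rfl⟩
      have hne : ¬ a.1 = kv0.1 := fun he => hnd.1 (he ▸ hmem)
      rw [List.eraseIdx_cons_succ, List.filter_cons_of_pos (by simp [hne]),
        ih j kv0 hget hnd.2]

lemma fits_iff_min_le (d : PySem.Dict String Int) (spare m : Int)
    (hm : PySem.List.min? d.values (fun v => v) = some m) :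
    (∃ kv ∈ d.items, kv.2 ≤ spare) ↔ m ≤ spare := by
  constructor
  · rintro ⟨kv, hkv, hle⟩
    have : m ≤ kv.2 := PySem.List.min?_isMin hm kv.2 (List.mem_map.mpr ⟨kv, hkv, rfl⟩)
    omega
  · intro hle
    have hmem : m ∈ d.values := PySem.List.min?_mem hm
    rcases List.mem_map.mp hmem with ⟨kv, hkv, rfl⟩
    exact ⟨kv, hkv, hle⟩

-- A's 'no more room / no more cows' break condition says exactly: nothing remaining fits
lemma break_iff_nofit (d : PySem.Dict String Int) (spare : Int) :
    (d.size = 0 ∨ spare < ((PySem.List.min? d.values (fun v => v)).getD 0)) ↔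
      ∀ kv ∈ d.items, ¬ kv.2 ≤ spare := by
  rcases hd : d.items with _ | ⟨kv, t⟩
  · simp [PySem.Dict.size, hd]
  · have hne : d.items ≠ [] := by rw [hd]; simp
    have hvne : d.values ≠ [] := by simp [PySem.Dict.values, hd]
    rcases hm : PySem.List.min? d.values (fun v => v) with _ | m
    · exact absurd ((PySem.List.min?_eq_none_iff _ _).mp hm) (by simpa [PySem.Dict.values] using hvne)
    · rw [← hd]
      simp only [Option.getD_some]
      constructor
      · rintro (h | h)
        · exact absurd (List.eq_nil_of_length_eq_zero h) hne
        · intro kv' hkv' hle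
          have : m ≤ kv'.2 := PySem.List.min?_isMin hm kv'.2 (List.mem_map.mpr ⟨kv', hkv', rfl⟩)
          omega
      · intro h
        right
        rcases List.mem_map.mp (PySem.List.min?_mem hm) with ⟨kv', hkv', rfl⟩
        have := h kv' hkv'
        omega

lemma filter_map_head (l : List (String × Int)) (w : Int) (kv0 : String × Int)
    (hfind : l.find? (fun kv => kv.2 == w) = some kv0) :
    ∃ ks, (l.filter (fun kv => kv.2 == w)).map (fun kv => kv.1) = kv0.1 :: ks := by
  have : (l.filter (fun kv => kv.2 == w)).head? = some kv0 := by
    rw [List.head?_filter]; exact hfind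
  rcases hf : l.filter (fun kv => kv.2 == w) with _ | ⟨a, t⟩
  · rw [hf] at this; cases this
  · rw [hf] at this
    injection this with h
    subst h
    exact ⟨t.map (fun kv => kv.1), by rw [hf]; simp⟩

lemma find?_key_eq_of_mem : ∀ (l : List (String × Int)) (kv0 : String × Int),
    kv0 ∈ l → (l.map Prod.fst).Nodup →
    l.find? (fun p => p.1 == kv0.1) = some kv0 := by
  intro l
  induction l with
  | nil => intro kv0 h; cases h
  | cons a t ih =>
    intro kv0 hmem hnd
    rw [List.map_cons, List.nodup_cons] at hnd
    rcases List.mem_cons.mp hmem with rfl | hmem'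
    · rw [List.find?_cons_of_pos (by simp)]
    · have hne : ¬ a.1 = kv0.1 := fun he =>
        hnd.1 (he ▸ List.mem_map.mpr ⟨kv0, hmem', rfl⟩)
      rw [List.find?_cons_of_neg (by simp [hne]), ih kv0 hmem' hnd.2]

lemma pvNegSum_nonneg (l : List (String × Int)) : 0 ≤ pvNegSum l := by
  unfold pvNegSum
  induction l with
  | nil => simp
  | cons kv t ih =>
    rw [List.map_cons, List.sum_cons]
    have : (0 : Int) ≤ if kv.2 < 0 then -kv.2 else 0 := by split_ifs <;> omega
    omega

lemma pvNegSum_sublist {l' l : List (String × Int)} (h : l'.Sublist l) :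
    pvNegSum l' ≤ pvNegSum l := by
  unfold pvNegSum
  induction h with
  | slnil => simp
  | cons kv _ ih =>
    rw [List.map_cons, List.sum_cons]
    have : (0 : Int) ≤ if kv.2 < 0 then -kv.2 else 0 := by split_ifs <;> omega
    omega
  | cons₂ kv _ ih =>
    rw [List.map_cons, List.sum_cons, List.map_cons, List.sum_cons]
    omega

lemma pvNegSum_eraseIdx (l : List (String × Int)) (i : Nat) (kv0 : String × Int)
    (h : l[i]? = some kv0) :
    pvNegSum l = pvNegSum (l.eraseIdx i) + (if kv0.2 < 0 then -kv0.2 else 0) := by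
  unfold pvNegSum
  induction l generalizing i with
  | nil => cases h
  | cons a t ih =>
    rcases i with _ | j
    · simp only [List.getElem?_cons_zero, Option.some.injEq] at h
      subst h
      rw [List.eraseIdx_cons_zero, List.map_cons, List.sum_cons]
      omega
    · simp only [List.getElem?_cons_succ] at h
      rw [List.eraseIdx_cons_succ, List.map_cons, List.sum_cons, List.map_cons,
        List.sum_cons, ih j h]
      omega

-- ---- B-side: characterisation of the sorted pair list and the binary search ----

-- strict lexicographic order on (weight, -index) pairs
def lexLt (a b : Int × Int) : Prop := a.1 < b.1 ∨ (a.1 = b.1 ∧ a.2 < b.2)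

def pvToPair (e : Int × (String × Int)) : Int × Int := (e.2.2, -e.1)

-- the loop invariant tying A's dict to B's sorted pair list: some subsequence S of the
-- enumerated original items carries exactly the remaining cows, in original order on A's
-- side and as a lexicographically sorted (weight, -index) list on B's side
def pvInv (items0 : List (String × Int)) (d : PySem.Dict String Int)
    (arr : List (Int × Int)) : Prop :=
  arr.Pairwise lexLt ∧ ∃ S : List (Int × (String × Int)),
    S.Sublist (PySem.List.enumerate items0) ∧ d.items = S.map Prod.snd ∧
    arr.Perm (S.map pvToPair)

-- the comparison sorted2 uses on our pairs
def pairLt (a b : Int × Int) : Bool :=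
  decide (a.1 < b.1) || (!decide (b.1 < a.1) && decide (a.2 < b.2))

lemma sorted2_eq_foldl (xs : List (Int × Int)) :
    PySem.List.sorted2 xs (fun p => p.1) (fun p => p.2) false =
      xs.foldl (fun acc x => PySem.List.insertBy pairLt x acc) [] := rfl

lemma pairLt_true (a b : Int × Int) :
    pairLt a b = true ↔ (a.1 < b.1 ∨ (¬ b.1 < a.1 ∧ a.2 < b.2)) := by
  simp [pairLt]

lemma pairLt_false (a b : Int × Int) :
    pairLt a b = false ↔ ¬ a.1 < b.1 ∧ (b.1 < a.1 ∨ ¬ a.2 < b.2) := by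
  rw [← Bool.not_eq_true, pairLt_true]
  constructor <;> intro h <;> omega

lemma insertBy_pairwise (x : Int × Int) (acc : List (Int × Int))
    (h : acc.Pairwise (fun a b => pairLt b a = false)) :
    (PySem.List.insertBy pairLt x acc).Pairwise (fun a b => pairLt b a = false) := by
  induction acc with
  | nil => exact List.pairwise_singleton _ x
  | cons y ys ih =>
    rcases List.pairwise_cons.mp h with ⟨hy, hys⟩
    rw [show PySem.List.insertBy pairLt x (y :: ys) =
        if pairLt x y = true then x :: y :: ys else y :: PySem.List.insertBy pairLt x ys from rfl]
    by_cases hxy : pairLt x y = true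
    · rw [if_pos hxy]
      refine List.pairwise_cons.mpr ⟨?_, h⟩
      intro z hz
      rw [pairLt_true] at hxy
      rcases List.mem_cons.mp hz with rfl | hz'
      · rw [pairLt_false]; omega
      · have hzy := hy z hz'
        rw [pairLt_false] at hzy ⊢
        omega
    · have hxy' : pairLt x y = false := by revert hxy; cases pairLt x y <;> simp
      rw [if_neg hxy]
      refine List.pairwise_cons.mpr ⟨?_, ih hys⟩
      intro z hz
      rcases (PySem.List.mem_insertBy _ _ _ _).mp hz with rfl | hz'
      · exact hxy'
      · exact hy z hz'

lemma foldl_insertBy_pairwise (xs : List (Int × Int)) :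
    ∀ acc, acc.Pairwise (fun a b => pairLt b a = false) →
    (xs.foldl (fun acc x => PySem.List.insertBy pairLt x acc) acc).Pairwise
      (fun a b => pairLt b a = false) := by
  induction xs with
  | nil => intro acc h; exact h
  | cons x t ih => intro acc h; exact ih _ (insertBy_pairwise x acc h)

lemma lexLt_of_pairLt_false (a b : Int × Int) (h1 : pairLt b a = false) (h2 : a ≠ b) :
    lexLt a b := by
  rw [pairLt_false] at h1
  have hab : a.1 ≠ b.1 ∨ a.2 ≠ b.2 := by
    by_contra hc
    push_neg at hc
    exact h2 (Prod.ext hc.1 hc.2)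
  unfold lexLt
  rcases hab with h | h <;> omega

lemma enum_map_snd : ∀ (xs : List (String × Int)) (s : Int),
    (PySem.List.enumerate xs s).map Prod.snd = xs := by
  intro xs
  induction xs with
  | nil => intro s; rfl
  | cons x t ih => intro s; simp [PySem.List.enumerate_cons, ih]

lemma enum_mem : ∀ (xs : List (String × Int)) (s : Int) (e : Int × (String × Int)),
    e ∈ PySem.List.enumerate xs s →
    ∃ j : Nat, j < xs.length ∧ e.1 = s + j ∧ xs[j]? = some e.2 := by
  intro xs
  induction xs with
  | nil =>
    intro s e h
    rw [show PySem.List.enumerate ([] : List (String × Int)) s = [] from rfl] at h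
    cases h
  | cons x t ih =>
    intro s e h
    rw [PySem.List.enumerate_cons] at h
    rcases List.mem_cons.mp h with rfl | h'
    · exact ⟨0, by simp, by simp, by simp⟩
    · rcases ih (s + 1) e h' with ⟨j, hj, he1, he2⟩
      refine ⟨j + 1, by simpa using hj, by push_cast; omega, by simpa using he2⟩

lemma enum_pairwise : ∀ (xs : List (String × Int)) (s : Int),
    (PySem.List.enumerate xs s).Pairwise (fun a b => a.1 < b.1) := by
  intro xs
  induction xs with
  | nil =>
    intro s
    rw [show PySem.List.enumerate ([] : List (String × Int)) s = [] from rfl]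
    exact List.Pairwise.nil
  | cons x t ih =>
    intro s
    rw [PySem.List.enumerate_cons]
    refine List.pairwise_cons.mpr ⟨?_, ih (s + 1)⟩
    intro b hb
    rcases enum_mem t (s + 1) b hb with ⟨j, _, he1, _⟩
    show s < b.1
    omega

-- the binary search returns the split point: everything below fits, everything above does not
lemma bsLoop_spec (arr : List (Int × Int)) (spare : Int)
    (hmono : ∀ (i j : Nat) (hij : i ≤ j) (hj : j < arr.length),
      (arr[i]'(Nat.lt_of_le_of_lt hij hj)).1 ≤ arr[j].1) :
    ∀ (n lo hi : Nat), hi - lo ≤ n → lo ≤ hi → hi ≤ arr.length →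
    (∀ j (hj : j < arr.length), j < lo → arr[j].1 ≤ spare) →
    (∀ j (hj : j < arr.length), hi ≤ j → spare < arr[j].1) →
    lo ≤ bsLoop arr spare lo hi ∧ bsLoop arr spare lo hi ≤ hi ∧
    (∀ j (hj : j < arr.length), j < bsLoop arr spare lo hi → arr[j].1 ≤ spare) ∧
    (∀ j (hj : j < arr.length), bsLoop arr spare lo hi ≤ j → spare < arr[j].1) := by
  intro n
  induction n with
  | zero =>
    intro lo hi hn hlh hhi hlow hhigh
    rw [bsLoop, dif_neg (by omega : ¬ lo < hi)]
    exact ⟨le_refl _, hlh, fun j hj hjlo => hlow j hj hjlo,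
      fun j hj hle => hhigh j hj (by omega)⟩
  | succ n ih =>
    intro lo hi hn hlh hhi hlow hhigh
    by_cases h : lo < hi
    · have hmid : (lo + hi) / 2 < arr.length := by omega
      have hget : ((PySem.List.pyGet? arr (((lo + hi) / 2 : Nat) : Int)).getD (0, 0)).1 =
          (arr[(lo + hi) / 2]'hmid).1 := by
        rw [PySem.List.pyGet?_natCast, List.getElem?_eq_getElem hmid]
        rfl
      by_cases hfit : ((PySem.List.pyGet? arr (((lo + hi) / 2 : Nat) : Int)).getD (0, 0)).1 ≤ spare
      · have heq : bsLoop arr spare lo hi = bsLoop arr spare ((lo + hi) / 2 + 1) hi := by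
          rw [bsLoop]; simp only [dif_pos h, if_pos hfit]
        rw [heq]
        have hfitm : (arr[(lo + hi) / 2]'hmid).1 ≤ spare := by rw [← hget]; exact hfit
        have hres := ih ((lo + hi) / 2 + 1) hi (by omega) (by omega) hhi
          (fun j hj hjlt => le_trans (hmono j ((lo + hi) / 2) (by omega) hmid) hfitm) hhigh
        exact ⟨by omega, hres.2.1, hres.2.2.1, hres.2.2.2⟩
      · have heq : bsLoop arr spare lo hi = bsLoop arr spare lo ((lo + hi) / 2) := by
          rw [bsLoop]; simp only [dif_pos h, if_neg hfit]
        rw [heq]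
        have hfitm : spare < (arr[(lo + hi) / 2]'hmid).1 := by rw [← hget]; omega
        have hres := ih lo ((lo + hi) / 2) (by omega) (by omega) (by omega) hlow
          (fun j hj hle => lt_of_lt_of_le hfitm (hmono ((lo + hi) / 2) j hle hj))
        exact ⟨hres.1, by omega, hres.2.2.1, hres.2.2.2⟩
    · rw [bsLoop, dif_neg h]
      exact ⟨le_refl _, hlh, fun j hj hjlo => hlow j hj hjlo,
        fun j hj hle => hhigh j hj (by omega)⟩

lemma lexLt_weight_mono (arr : List (Int × Int)) (hpw : arr.Pairwise lexLt) :
    ∀ (i j : Nat) (hij : i ≤ j) (hj : j < arr.length),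
      (arr[i]'(Nat.lt_of_le_of_lt hij hj)).1 ≤ arr[j].1 := by
  intro i j hij hj
  rcases Nat.eq_or_lt_of_le hij with rfl | hlt
  · exact le_refl _
  · have := List.pairwise_iff_getElem.mp hpw i j (by omega) hj hlt
    unfold lexLt at this
    omega

lemma bs_zero_iff (arr : List (Int × Int)) (spare : Int) (hpw : arr.Pairwise lexLt) :
    bsLoop arr spare 0 arr.length = 0 ↔ ∀ q ∈ arr, ¬ q.1 ≤ spare := by
  obtain ⟨h1, h2, h3, h4⟩ := bsLoop_spec arr spare (lexLt_weight_mono arr hpw)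
    arr.length 0 arr.length (by omega) (by omega) (le_refl _)
    (by intro j hj h0; omega) (by intro j hj hle; omega)
  constructor
  · intro h0 q hq hqs
    obtain ⟨j, hj, hjq⟩ := List.mem_iff_getElem.mp hq
    have := h4 j hj (by omega)
    rw [hjq] at this
    omega
  · intro hno
    by_contra h0
    have hlt : bsLoop arr spare 0 arr.length - 1 < arr.length := by omega
    have := h3 (bsLoop arr spare 0 arr.length - 1) hlt (by omega)
    exact hno _ (List.getElem_mem hlt) this

lemma inv_fit_iff (items0 : List (String × Int)) (d : PySem.Dict String Int)
    (arr : List (Int × Int)) (spare : Int) (hInv : pvInv items0 d arr) :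
    (∃ q ∈ arr, q.1 ≤ spare) ↔ ∃ kv ∈ d.items, kv.2 ≤ spare := by
  obtain ⟨hpw, S, hSub, hdS, hperm⟩ := hInv
  constructor
  · rintro ⟨q, hq, hle⟩
    obtain ⟨e, heS, heq⟩ := List.mem_map.mp (hperm.subset hq)
    refine ⟨e.2, by rw [hdS]; exact List.mem_map_of_mem heS, ?_⟩
    have h1 : e.2.2 = q.1 := congrArg Prod.fst heq
    omega
  · rintro ⟨kv, hkv, hle⟩
    rw [hdS] at hkv
    obtain ⟨e, heS, heq⟩ := List.mem_map.mp hkv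
    refine ⟨pvToPair e, hperm.mem_iff.mpr (List.mem_map_of_mem heS), ?_⟩
    show e.2.2 ≤ spare
    rw [heq]
    exact hle

lemma inv_length (items0 : List (String × Int)) (d : PySem.Dict String Int)
    (arr : List (Int × Int)) (hInv : pvInv items0 d arr) : arr.length = d.items.length := by
  obtain ⟨_, S, _, hdS, hperm⟩ := hInv
  rw [hperm.length_eq, List.length_map, hdS, List.length_map]

-- everything both programs do in one pick step, in one bundle
lemma pick_lemma (items0 : List (String × Int)) (d : PySem.Dict String Int)
    (arr : List (Int × Int)) (spare : Int) (hInv : pvInv items0 d arr)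
    (hndk : (d.items.map Prod.fst).Nodup)
    (hr : bsLoop arr spare 0 arr.length ≠ 0) :
    ∃ (p : Int × Int) (j0 : Nat) (kv0 : String × Int),
      PySem.List.pop? arr ((bsLoop arr spare 0 arr.length : Int) - 1) =
        some (p, arr.eraseIdx (bsLoop arr spare 0 arr.length - 1)) ∧
      d.items[j0]? = some kv0 ∧ kv0.2 = p.1 ∧ p.1 ≤ spare ∧
      nextCow d spare = kv0.1 ∧
      ((PySem.List.pyGet? items0 (-p.2)).getD ("", 0)).1 = kv0.1 ∧
      d.get? kv0.1 = some kv0.2 ∧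
      (d.erase kv0.1).items = d.items.eraseIdx j0 ∧
      pvInv items0 (d.erase kv0.1) (arr.eraseIdx (bsLoop arr spare 0 arr.length - 1)) ∧
      j0 < d.items.length ∧ bsLoop arr spare 0 arr.length - 1 < arr.length := by
  obtain ⟨hpw, S, hSub, hdS, hperm⟩ := hInv
  obtain ⟨_, hrle, hfit, hnofit⟩ := bsLoop_spec arr spare (lexLt_weight_mono arr hpw)
    arr.length 0 arr.length (by omega) (by omega) (le_refl _)
    (by intro j hj h0; omega) (by intro j hj hle; omega)
  set r := bsLoop arr spare 0 arr.length with hrdef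
  have hrpos : 0 < r := Nat.pos_of_ne_zero hr
  have hr1 : r - 1 < arr.length := by omega
  set p := arr[r - 1]'hr1 with hpdef
  have hpfit : p.1 ≤ spare := hfit (r - 1) hr1 (by omega)
  have hidx : PySem.List.pyIdx? arr.length ((r : Int) - 1) = some (r - 1) := by
    unfold PySem.List.pyIdx?
    rw [if_pos (by omega), if_pos (by omega)]
    congr 1
    omega
  have hpop : PySem.List.pop? arr ((r : Int) - 1) = some (p, arr.eraseIdx (r - 1)) := by
    unfold PySem.List.pop?
    rw [hidx]
    simp [List.getElem?_eq_getElem hr1]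
    rw [hpdef]
  have hmaxw : ∀ q ∈ arr, q.1 ≤ spare → q.1 ≤ p.1 := by
    intro q hq hqs
    obtain ⟨j, hj, hjq⟩ := List.mem_iff_getElem.mp hq
    by_cases hjr : j < r
    · rw [← hjq]
      exact lexLt_weight_mono arr hpw j (r - 1) (by omega) hr1
    · have := hnofit j hj (by omega)
      rw [hjq] at this
      omega
  have hmaxi : ∀ q ∈ arr, q.1 = p.1 → q.2 ≤ p.2 := by
    intro q hq hq1
    obtain ⟨j, hj, hjq⟩ := List.mem_iff_getElem.mp hq
    rcases lt_trichotomy j (r - 1) with hlt | heq | hgt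
    · have := List.pairwise_iff_getElem.mp hpw j (r - 1) hj hr1 hlt
      rw [hjq, ← hpdef] at this
      unfold lexLt at this
      omega
    · subst heq
      rw [← hjq]
    · have := hnofit j hj (by omega)
      rw [hjq] at this
      omega
  -- the S-entry behind p
  have hpmem : p ∈ arr := List.getElem_mem hr1
  obtain ⟨e, heS, hep⟩ := List.mem_map.mp (hperm.subset hpmem)
  have he1 : e.2.2 = p.1 := congrArg Prod.fst hep
  have he2 : -e.1 = p.2 := congrArg Prod.snd hep
  obtain ⟨jx, hjx, hjx1, hjx2⟩ := enum_mem items0 0 e (hSub.subset heS)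
  -- A's pick
  have hPmem : ∃ kv ∈ d.items, (kv.2 == p.1) = true :=
    ⟨e.2, by rw [hdS]; exact List.mem_map_of_mem heS, by simp [he1]⟩
  set j0 := List.findIdx (fun kv => kv.2 == p.1) d.items with hj0def
  have hj0lt : j0 < d.items.length := List.findIdx_lt_length_of_exists hPmem
  set kv0 := d.items[j0]'hj0lt with hkv0def
  have hfind : d.items.find? (fun kv => kv.2 == p.1) = some kv0 := by
    rw [List.find?_eq_getElem?_findIdx, ← hj0def, List.getElem?_eq_getElem hj0lt]
  have hkv0w : kv0.2 = p.1 := by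
    have := List.find?_some hfind
    simpa using this
  have hkv0mem : kv0 ∈ d.items := List.getElem_mem hj0lt
  -- identify kv0 with e.2
  have hlenS : d.items.length = S.length := by rw [hdS, List.length_map]
  have hj0S : j0 < S.length := by omega
  have hitems_j0 : kv0 = (S[j0]'hj0S).2 := by
    rw [hkv0def]
    have h1 : d.items[j0]'hj0lt = (S.map Prod.snd)[j0]'(by rw [← hdS]; exact hj0lt) :=
      List.getElem_of_eq hdS hj0lt
    rw [h1, List.getElem_map]
  have hSpw : S.Pairwise (fun a b => a.1 < b.1) := (enum_pairwise items0 0).sublist hSub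
  have hq0arr : pvToPair (S[j0]'hj0S) ∈ arr :=
    hperm.mem_iff.mpr (List.mem_map_of_mem (List.getElem_mem hj0S))
  have hq0w : (pvToPair (S[j0]'hj0S)).1 = p.1 := by
    show (S[j0]'hj0S).2.2 = p.1
    rw [← hitems_j0]
    exact hkv0w
  have hi0le : -(S[j0]'hj0S).1 ≤ p.2 := hmaxi _ hq0arr hq0w
  obtain ⟨j1, hj1, hj1e⟩ := List.mem_iff_getElem.mp heS
  have hj0le : j0 ≤ j1 := by
    by_contra hgt
    push_neg at hgt
    have hj1d : j1 < d.items.length := by omega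
    have h1 : d.items[j1]'hj1d = (S[j1]'hj1).2 := by
      have h2 := List.getElem_of_eq hdS hj1d
      rw [h2, List.getElem_map]
    have hp1 : ((d.items[j1]'hj1d).2 == p.1) = true := by
      rw [h1, hj1e]
      simp [he1]
    have hfalse : ((d.items[j1]'hj1d).2 == p.1) = false :=
      List.not_of_lt_findIdx (xs := d.items) (p := fun kv => kv.2 == p.1) (i := j1) (by omega)
    rw [hp1] at hfalse
    simp at hfalse
  have hi0e : (S[j0]'hj0S).1 ≤ e.1 := by
    rcases Nat.eq_or_lt_of_le hj0le with heq | hlt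
    · have : S[j0]'hj0S = e := by rw [← hj1e]; congr 1
      rw [this]
    · have := List.pairwise_iff_getElem.mp hSpw j0 j1 hj0S hj1 hlt
      rw [hj1e] at this
      omega
  have hii : (S[j0]'hj0S).1 = e.1 := by omega
  have hj01 : j0 = j1 := by
    by_contra hne
    have hlt : j0 < j1 := lt_of_le_of_ne hj0le hne
    have := List.pairwise_iff_getElem.mp hSpw j0 j1 hj0S hj1 hlt
    rw [hj1e] at this
    omega
  have hkv0e : kv0 = e.2 := by
    rw [hitems_j0]
    congr 1
    rw [← hj1e]
    congr 1
  -- the name B appends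
  have hname : ((PySem.List.pyGet? items0 (-p.2)).getD ("", 0)).1 = kv0.1 := by
    have hidx2 : -p.2 = ((jx : Nat) : Int) := by omega
    rw [hidx2, PySem.List.pyGet?_natCast, hjx2, hkv0e]
    rfl
  -- dict lookup
  have hget? : d.get? kv0.1 = some kv0.2 := by
    show ((d.items.find? (fun q => q.1 == kv0.1)).map (fun x => x.2)) = some kv0.2
    rw [find?_key_eq_of_mem d.items kv0 hkv0mem hndk]
    rfl
  -- next_cow
  have hbest : IsBest spare d.items p.1 := by
    refine ⟨List.mem_map.mpr ⟨kv0, hkv0mem, hkv0w⟩, hpfit, ?_⟩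
    intro kv hkv hkvs
    rw [hdS] at hkv
    obtain ⟨e', he'S, he'⟩ := List.mem_map.mp hkv
    have hmem' : pvToPair e' ∈ arr := hperm.mem_iff.mpr (List.mem_map_of_mem he'S)
    have hw' : (pvToPair e').1 = kv.2 := by show e'.2.2 = kv.2; rw [he']
    have := hmaxw _ hmem' (by rw [hw']; exact hkvs)
    omega
  obtain ⟨ks, hfil⟩ := filter_map_head d.items p.1 kv0 hfind
  have hnext : nextCow d spare = kv0.1 := nextCow_eq_of_isBest d spare p.1 hbest kv0.1 ks hfil
  -- erasure on A's side
  have herase : (d.erase kv0.1).items = d.items.eraseIdx j0 := by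
    show d.items.filter (fun q => !(q.1 == kv0.1)) = _
    exact filter_key_eq_eraseIdx d.items j0 kv0 (by rw [List.getElem?_eq_getElem hj0lt]) hndk
  -- the invariant after the removal
  have hndarr : arr.Nodup := by
    refine hpw.imp ?_
    intro a b h hab
    subst hab
    unfold lexLt at h
    omega
  have hmapnd : (S.map pvToPair).Nodup := hperm.nodup_iff.mp hndarr
  have hj0m : j0 < (S.map pvToPair).length := by rw [List.length_map]; exact hj0S
  have hSj0get : (S.map pvToPair)[j0]'hj0m = p := by
    rw [List.getElem_map]
    rw [show S[j0]'hj0S = e from by rw [← hj1e]; congr 1]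
    exact hep
  have hePos : arr.eraseIdx (r - 1) = arr.erase p :=
    (List.Nodup.erase_getElem hndarr (r - 1) hr1).symm
  have hmapErase : (S.map pvToPair).erase p = (S.eraseIdx j0).map pvToPair := by
    rw [← List.eraseIdx_map, ← hSj0get]
    exact List.Nodup.erase_getElem hmapnd j0 hj0m
  refine ⟨p, j0, kv0, hpop, by rw [List.getElem?_eq_getElem hj0lt], hkv0w, hpfit, hnext,
    hname, hget?, herase, ?_, hj0lt, hr1⟩
  refine ⟨hpw.sublist (List.eraseIdx_sublist _ _), S.eraseIdx j0,
    (List.eraseIdx_sublist _ _).trans hSub, ?_, ?_⟩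
  · rw [herase, hdS]
    exact List.eraseIdx_map _ _ _
  · rw [hePos, ← hmapErase]
    exact List.Perm.erase p hperm

lemma altShip_stop (items0 : List (String × Int)) (fuel : Nat) (arr : List (Int × Int))
    (spare : Int) (ship : List String) (h : bsLoop arr spare 0 arr.length = 0) :
    altShip items0 fuel arr spare ship = (ship, arr) := by
  cases fuel with
  | zero => rfl
  | succ f => simp [altShip, h]

lemma altShip_prefix (items0 : List (String × Int)) :
    ∀ (fuel : Nat) (arr : List (Int × Int)) (spare : Int) (ship : List String),
    ∃ t, (altShip items0 fuel arr spare ship).1 = ship ++ t := by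
  intro fuel
  induction fuel with
  | zero => intro arr spare ship; exact ⟨[], by simp [altShip]⟩
  | succ f ih =>
    intro arr spare ship
    by_cases h : bsLoop arr spare 0 arr.length = 0
    · exact ⟨[], by simp [altShip, h]⟩
    · rcases ih ((PySem.List.pop? arr ((bsLoop arr spare 0 arr.length : Int) - 1)).getD ((0,0), arr)).2
        (spare - ((PySem.List.pop? arr ((bsLoop arr spare 0 arr.length : Int) - 1)).getD ((0,0), arr)).1.1)
        (ship ++ [((PySem.List.pyGet? items0 (-((PySem.List.pop? arr ((bsLoop arr spare 0 arr.length : Int) - 1)).getD ((0,0), arr)).1.2)).getD ("", 0)).1]) with ⟨t, ht⟩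
      refine ⟨((PySem.List.pyGet? items0 (-((PySem.List.pop? arr ((bsLoop arr spare 0 arr.length : Int) - 1)).getD ((0,0), arr)).1.2)).getD ("", 0)).1 :: t, ?_⟩
      simp only [altShip, if_neg h]
      rw [ht]
      simp

lemma altShip_fst_ne_nil (items0 : List (String × Int)) (fuel : Nat) (arr : List (Int × Int))
    (spare : Int) (hr : bsLoop arr spare 0 arr.length ≠ 0) :
    (altShip items0 (fuel + 1) arr spare []).1 ≠ [] := by
  simp only [altShip, if_neg hr]
  obtain ⟨t, ht⟩ := altShip_prefix items0 fuel _ _ _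
  rw [ht]
  simp

-- the inner loops agree and re-establish the invariant
lemma ship_eq (C : Int) (items0 : List (String × Int)) :
    ∀ (fA : Nat) (d : PySem.Dict String Int) (arr : List (Int × Int)) (spare : Int)
      (ship : List String) (sch : List (List String)) (fB : Nat),
    (d.items.map Prod.fst).Nodup →
    (∀ kv ∈ d.items, kv.1 = "" → C < kv.2) →
    spare + pvNegSum d.items ≤ C →
    d.size < fA → arr.length ≤ fB →
    pvInv items0 d arr →
    (∃ kv ∈ d.items, kv.2 ≤ spare) →
    ∃ d' : PySem.Dict String Int,
      shipLoop fA d spare ship sch = (sch ++ [(altShip items0 fB arr spare ship).1], d') ∧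
      d'.items.Sublist d.items ∧
      pvInv items0 d' (altShip items0 fB arr spare ship).2 ∧
      (altShip items0 fB arr spare ship).2.length < arr.length := by
  intro fA
  induction fA with
  | zero => intro d arr spare ship sch fB _ _ _ hfa _ _ _; omega
  | succ fa ih =>
    intro d arr spare ship sch fB hndk hC hinv hfa hfb hInv hfit
    have hne : d.items ≠ [] := by
      rcases hfit with ⟨kv, hkv, _⟩
      intro h; rw [h] at hkv; cases hkv
    rcases hm : PySem.List.min? d.values (fun v => v) with _ | m
    · exact absurd ((PySem.List.min?_eq_none_iff _ _).mp hm)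
        (by simpa [PySem.Dict.values] using hne)
    have hmle : m ≤ spare := (fits_iff_min_le d spare m hm).mp hfit
    have hr : bsLoop arr spare 0 arr.length ≠ 0 := by
      intro h0
      rcases (inv_fit_iff items0 d arr spare hInv).mpr hfit with ⟨q, hq, hqle⟩
      exact (bs_zero_iff arr spare hInv.1).mp h0 q hq hqle
    obtain ⟨p, j0, kv0, hpop, hgetj0, hkv0w, hpfit, hnext, hname, hget?, herase, hInv', hj0lt, hrlt⟩ :=
      pick_lemma items0 d arr spare hInv hndk hr
    set r := bsLoop arr spare 0 arr.length with hrdef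
    have hkv0mem : kv0 ∈ d.items := List.mem_of_getElem? hgetj0
    have hname0 : kv0.1 ≠ "" := by
      intro heq
      have h1 := hC kv0 hkv0mem heq
      have h3 := pvNegSum_nonneg d.items
      omega
    have hA : shipLoop (fa + 1) d spare ship sch =
        if (d.erase kv0.1).size = 0 ∨ spare - kv0.2 <
            ((PySem.List.min? (d.erase kv0.1).values (fun v => v)).getD 0) then
          (sch ++ [ship ++ [kv0.1]], d.erase kv0.1)
        else shipLoop fa (d.erase kv0.1) (spare - kv0.2) (ship ++ [kv0.1]) sch := by
      show (match PySem.List.min? d.values (fun v => v) with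
        | none => (sch, d)
        | some m =>
          if m ≤ spare then
            let nxt := nextCow d spare
            if nxt = "" then (sch ++ [ship], d)
            else
              let ship' := ship ++ [nxt]
              let w := (d.get? nxt).getD 0
              let spare' := spare - w
              let d' := d.erase nxt
              if d'.size = 0 ∨ spare' < ((PySem.List.min? d'.values (fun v => v)).getD 0) then
                (sch ++ [ship'], d')
              else shipLoop fa d' spare' ship' sch
          else (sch, d)) = _
      rw [hm]
      simp only [if_pos hmle, hnext, if_neg hname0, hget?, Option.getD_some]
    obtain ⟨fb, rfl⟩ : ∃ fb, fB = fb + 1 := ⟨fB - 1, by omega⟩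
    have hB : altShip items0 (fb + 1) arr spare ship =
        altShip items0 fb (arr.eraseIdx (r - 1)) (spare - p.1) (ship ++ [kv0.1]) := by
      show (if bsLoop arr spare 0 arr.length = 0 then (ship, arr)
        else
          altShip items0 fb
            ((PySem.List.pop? arr ((bsLoop arr spare 0 arr.length : Int) - 1)).getD ((0, 0), arr)).2
            (spare -
              ((PySem.List.pop? arr ((bsLoop arr spare 0 arr.length : Int) - 1)).getD ((0, 0), arr)).1.1)
            (ship ++
              [((PySem.List.pyGet? items0
                  (-((PySem.List.pop? arr ((bsLoop arr spare 0 arr.length : Int) - 1)).getD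
                    ((0, 0), arr)).1.2)).getD ("", 0)).1])) = _
      rw [← hrdef, if_neg hr]
      simp only [hpop, Option.getD_some, hname]
    have hspare' : spare - kv0.2 = spare - p.1 := by rw [hkv0w]
    rw [← hspare'] at hB
    by_cases hbrk : (d.erase kv0.1).size = 0 ∨ spare - kv0.2 <
        ((PySem.List.min? (d.erase kv0.1).values (fun v => v)).getD 0)
    · have hnof := (break_iff_nofit _ _).mp hbrk
      have hbz : bsLoop (arr.eraseIdx (r - 1)) (spare - kv0.2) 0
          (arr.eraseIdx (r - 1)).length = 0 := by
        rw [bs_zero_iff _ _ hInv'.1]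
        intro q hq hqle
        rcases (inv_fit_iff items0 _ _ (spare - kv0.2) hInv').mp ⟨q, hq, hqle⟩ with
          ⟨kv, hkv, hkvle⟩
        exact hnof kv hkv hkvle
      refine ⟨d.erase kv0.1, ?_, ?_, ?_, ?_⟩
      · rw [hA, if_pos hbrk, hB, altShip_stop items0 fb _ _ _ hbz]
      · rw [herase]; exact List.eraseIdx_sublist _ _
      · rw [hB, altShip_stop items0 fb _ _ _ hbz]
        exact hInv'
      · rw [hB, altShip_stop items0 fb _ _ _ hbz]
        show (arr.eraseIdx (r - 1)).length < arr.length
        rw [List.length_eraseIdx_of_lt hrlt]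
        omega
    · have hfit' : ∃ kv ∈ (d.erase kv0.1).items, kv.2 ≤ spare - kv0.2 := by
        by_contra hno
        push_neg at hno
        exact hbrk ((break_iff_nofit _ _).mpr (fun kv hkv => by
          intro hle
          exact absurd hle (by
            have := hno kv hkv
            omega)))
      have hsub' : (d.erase kv0.1).items.Sublist d.items := by
        rw [herase]; exact List.eraseIdx_sublist _ _
      have hndk' : ((d.erase kv0.1).items.map Prod.fst).Nodup := hndk.sublist (hsub'.map _)
      have hC' : ∀ kv ∈ (d.erase kv0.1).items, kv.1 = "" → C < kv.2 :=
        fun kv h => hC kv (hsub'.subset h)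
      have hinv' : (spare - kv0.2) + pvNegSum (d.erase kv0.1).items ≤ C := by
        have hns := pvNegSum_eraseIdx d.items j0 kv0 hgetj0
        rw [herase]
        split_ifs at hns <;> omega
      have hsize' : (d.erase kv0.1).size < fa := by
        show (d.erase kv0.1).items.length < fa
        rw [herase, List.length_eraseIdx_of_lt hj0lt]
        have hds : d.size = d.items.length := rfl
        have hpos : 0 < d.items.length := List.length_pos_iff.mpr hne
        omega
      have harr' : (arr.eraseIdx (r - 1)).length ≤ fb := by
        rw [List.length_eraseIdx_of_lt hrlt]
        omega
      obtain ⟨d'', heq'', hsub'', hInv'', hlen''⟩ := ih (d.erase kv0.1) (arr.eraseIdx (r - 1))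
        (spare - kv0.2) (ship ++ [kv0.1]) sch fb hndk' hC' hinv' hsize' harr' hInv' hfit'
      refine ⟨d'', ?_, hsub''.trans hsub', ?_, ?_⟩
      · rw [hA, if_neg hbrk, heq'', hB]
      · rw [hB]; exact hInv''
      · rw [hB]
        have h2 : (arr.eraseIdx (r - 1)).length < arr.length := by
          rw [List.length_eraseIdx_of_lt hrlt]
          omega
        omega

-- once no remaining cow fits into a fresh ship, A's Python spins without progress; its
-- fuel-guarded port hands the accumulated schedule back unchanged
lemma outer_stuck (limit : Int) (m : Int) : ∀ (fA : Nat) (d : PySem.Dict String Int)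
    (sch : List (List String)),
    PySem.List.min? d.values (fun v => v) = some m → ¬ m ≤ limit →
    outerLoop fA d limit sch = sch := by
  intro fA
  induction fA with
  | zero => intro d sch _ _; rfl
  | succ fa ih =>
    intro d sch hm hml
    have hstop : shipLoop (d.size + 1) d limit [] sch = (sch, d) := by
      show (match PySem.List.min? d.values (fun v => v) with
        | none => (sch, d)
        | some m =>
          if m ≤ limit then
            let nxt := nextCow d limit
            if nxt = "" then (sch ++ [([] : List String)], d)
            else
              let ship' := [] ++ [nxt]
              let w := (d.get? nxt).getD 0
              let spare' := limit - w
              let d' := d.erase nxt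
              if d'.size = 0 ∨ spare' < ((PySem.List.min? d'.values (fun v => v)).getD 0) then
                (sch ++ [ship'], d')
              else shipLoop (d.size + 1 - 1) d' spare' ship' sch
          else (sch, d)) = (sch, d)
      simp only [hm]
      rw [if_neg hml]
    have hz : ¬ d.size = 0 := by
      intro h
      have : d.values = [] := by
        show d.items.map (fun kv => kv.2) = []
        rw [List.eq_nil_of_length_eq_zero h]
        rfl
      rw [this] at hm
      cases hm
    calc outerLoop (fa + 1) d limit sch
        = outerLoop fa (shipLoop (d.size + 1) d limit [] sch).2 limit
            (shipLoop (d.size + 1) d limit [] sch).1 := by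
          show (if d.size = 0 then sch else _) = _
          rw [if_neg hz]
      _ = sch := by rw [hstop]; exact ih d sch hm hml

lemma outer_eq (limit C : Int) (items0 : List (String × Int)) :
    ∀ (fA : Nat) (d : PySem.Dict String Int) (sch : List (List String)) (fB : Nat)
      (arr : List (Int × Int)),
    (d.items.map Prod.fst).Nodup →
    (∀ kv ∈ d.items, kv.1 = "" → C < kv.2) →
    limit + pvNegSum d.items ≤ C →
    d.size < fA → arr.length ≤ fB →
    pvInv items0 d arr →
    outerLoop fA d limit sch = altOuter items0 fB arr limit sch := by
  intro fA
  induction fA with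
  | zero => intro d sch fB arr _ _ _ hfa _ _; omega
  | succ fa ih =>
    intro d sch fB arr hndk hC hinv hfa hfb hInv
    have hlenE : arr.length = d.items.length := inv_length items0 d arr hInv
    by_cases hz : d.size = 0
    · have hdnil : d.items = [] := List.eq_nil_of_length_eq_zero hz
      have harrnil : arr = [] := List.eq_nil_of_length_eq_zero (by rw [hlenE, hdnil]; rfl)
      have hA : outerLoop (fa + 1) d limit sch = sch := by
        show (if d.size = 0 then sch else _) = sch
        rw [if_pos hz]
      rw [hA]
      cases fB with
      | zero => rfl
      | succ fb =>
        rw [harrnil]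
        rfl
    · have hItne : d.items ≠ [] := by
        intro h
        apply hz
        show d.items.length = 0
        rw [h]
        rfl
      have hpos : 0 < d.items.length := List.length_pos_iff.mpr hItne
      rcases hm : PySem.List.min? d.values (fun v => v) with _ | m
      · exact absurd ((PySem.List.min?_eq_none_iff _ _).mp hm)
          (by simpa [PySem.Dict.values] using hItne)
      have harrne : arr ≠ [] := by
        intro h
        rw [h] at hlenE
        simp at hlenE
        omega
      obtain ⟨fb, rfl⟩ : ∃ fb, fB = fb + 1 := ⟨fB - 1, by
        have : 0 < arr.length := by omega
        omega⟩
      by_cases hml : m ≤ limit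
      · -- some cow fits: one full ship, then recurse
        have hfit : ∃ kv ∈ d.items, kv.2 ≤ limit := (fits_iff_min_le d limit m hm).mpr hml
        obtain ⟨d'', heq'', hsub'', hInv'', hlen''⟩ := ship_eq C items0 (d.size + 1) d arr limit
          [] sch arr.length hndk hC hinv (by omega) (le_refl _) hInv hfit
        have hr : bsLoop arr limit 0 arr.length ≠ 0 := by
          intro h0
          rcases (inv_fit_iff items0 d arr limit hInv).mpr hfit with ⟨q, hq, hqle⟩
          exact (bs_zero_iff arr limit hInv.1).mp h0 q hq hqle
        have hshipne : (altShip items0 arr.length arr limit []).1 ≠ [] := by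
          obtain ⟨n0, hn0⟩ : ∃ n0, arr.length = n0 + 1 := ⟨arr.length - 1, by omega⟩
          rw [hn0]
          exact altShip_fst_ne_nil items0 n0 arr limit hr
        have hBstep : altOuter items0 (fb + 1) arr limit sch =
            altOuter items0 fb (altShip items0 arr.length arr limit []).2 limit
              (sch ++ [(altShip items0 arr.length arr limit []).1]) := by
          show (if arr.isEmpty then sch
            else
              if (altShip items0 arr.length arr limit []).1.isEmpty then sch
              else altOuter items0 fb (altShip items0 arr.length arr limit []).2 limit
                (sch ++ [(altShip items0 arr.length arr limit []).1])) = _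
          rw [if_neg (by simpa [List.isEmpty_iff] using harrne)]
          rw [if_neg (by simpa [List.isEmpty_iff] using hshipne)]
        have hA : outerLoop (fa + 1) d limit sch =
            outerLoop fa (shipLoop (d.size + 1) d limit [] sch).2 limit
              (shipLoop (d.size + 1) d limit [] sch).1 := by
          show (if d.size = 0 then sch else _) = _
          rw [if_neg hz]
        rw [hA, heq'', hBstep]
        have hlen2 : (altShip items0 arr.length arr limit []).2.length = d''.items.length :=
          inv_length items0 d'' _ hInv''
        refine ih d'' (sch ++ [(altShip items0 arr.length arr limit []).1]) fb
          (altShip items0 arr.length arr limit []).2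
          (hndk.sublist (hsub''.map _)) (fun kv h => hC kv (hsub''.subset h))
          (by have := pvNegSum_sublist hsub''; omega)
          ?_ (by omega) hInv''
        show d''.items.length < fa
        have hds : d.size = d.items.length := rfl
        omega
      · -- nothing fits a fresh ship: A spins (port returns sch), B breaks on the empty ship
        rw [outer_stuck limit m (fa + 1) d sch hm hml]
        symm
        have hnofit : ∀ q ∈ arr, ¬ q.1 ≤ limit := by
          intro q hq hql
          rcases (inv_fit_iff items0 d arr limit hInv).mp ⟨q, hq, hql⟩ with ⟨kv, hkv, hkvle⟩
          exact hml (le_trans (PySem.List.min?_isMin hm kv.2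
            (List.mem_map.mpr ⟨kv, hkv, rfl⟩)) hkvle)
        have hbz : bsLoop arr limit 0 arr.length = 0 :=
          (bs_zero_iff arr limit hInv.1).mpr hnofit
        show (if arr.isEmpty then sch
          else
            if (altShip items0 arr.length arr limit []).1.isEmpty then sch
            else altOuter items0 fb (altShip items0 arr.length arr limit []).2 limit
              (sch ++ [(altShip items0 arr.length arr limit []).1])) = sch
        rw [if_neg (by simpa [List.isEmpty_iff] using harrne),
          altShip_stop items0 arr.length arr limit [] hbz]
        rfl

lemma initial_inv (cows : List (String × Int)) :
    pvInv (PySem.Dict.ofList cows).items (PySem.Dict.ofList cows)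
      (PySem.List.sorted2
        ((PySem.List.enumerate (PySem.Dict.ofList cows).items).map (fun e => (e.2.2, -e.1)))
        (fun p => p.1) (fun p => p.2)) := by
  set items0 := (PySem.Dict.ofList cows).items with hitems0
  set pairs0 := (PySem.List.enumerate items0).map (fun e => (e.2.2, -e.1)) with hpairs0def
  set arr0 := PySem.List.sorted2 pairs0 (fun p => p.1) (fun p => p.2) with harr0
  have hperm0 : arr0.Perm pairs0 := PySem.List.sorted2_perm _ _ _ _
  have hpairs0 : pairs0 = (PySem.List.enumerate items0).map pvToPair := rfl
  have hndpairs : pairs0.Nodup := by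
    rw [hpairs0]
    refine List.Pairwise.map _ ?_ (enum_pairwise items0 0)
    intro a b h hab
    have h2 : -a.1 = -b.1 := congrArg Prod.snd hab
    omega
  have hpwR : arr0.Pairwise (fun a b => pairLt b a = false) := by
    have := foldl_insertBy_pairwise pairs0 [] List.Pairwise.nil
    rw [← sorted2_eq_foldl] at this
    exact this
  have hnd0 : arr0.Nodup := hperm0.nodup_iff.mpr hndpairs
  have hpw0 : arr0.Pairwise lexLt := by
    refine (hpwR.and hnd0).imp ?_
    intro a b h
    exact lexLt_of_pairLt_false a b h.1 h.2
  exact ⟨hpw0, PySem.List.enumerate items0, List.Sublist.refl _,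
    (enum_map_snd items0 0).symm, by rw [← hpairs0]; exact hperm0⟩

-- ===== VERDICT (by name: the statement is the Claim_ definition above) =====
theorem richard_uk_spec : Claim_equal_richard_uk := by
  intro cows limit _ hpre
  show richard_uk cows limit = richard_uk_alt cows limit
  have hndk : ((PySem.Dict.ofList cows).items.map Prod.fst).Nodup :=
    PySem.Dict.nodup_keys_ofList cows
  exact outer_eq limit (limit + pvNegSum (PySem.Dict.ofList cows).items)
    (PySem.Dict.ofList cows).items ((PySem.Dict.ofList cows).size + 1)
    (PySem.Dict.ofList cows) []
    (PySem.List.sorted2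
      ((PySem.List.enumerate (PySem.Dict.ofList cows).items).map (fun e => (e.2.2, -e.1)))
      (fun p => p.1) (fun p => p.2)).length
    (PySem.List.sorted2
      ((PySem.List.enumerate (PySem.Dict.ofList cows).items).map (fun e => (e.2.2, -e.1)))
      (fun p => p.1) (fun p => p.2))
    hndk hpre (le_refl _) (Nat.lt_succ_self _) (le_refl _) (initial_inv cows)
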